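-- pv_equiv track=rewrite | github.com/gabrielcfvg/gsm | gsm/tests/semver.py | gen_core_arrangement_with_repetition
-- ===== SOURCE A (Python) =====
-- def gen_core_arrangement_with_repetition(
--         core_values: set[int], core_gen_null: bool = True,
--         always_included: set[int] = set()) -> list[list[int]]:
--
--     assert always_included.issubset(core_values)
--     output: list[list[int]] = []
--
--     def push(core_list: list[int]):
--
--         for obligatory_item in always_included:
--             if obligatory_item not in core_list:
--                 return
--
--         output.append(core_list)
--
--     for major in core_values:
--
--         if core_gen_null:
--             push([major])
--
--         for minor in core_values:
--
--             if core_gen_null: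
--                 push([major, minor])
--
--             for patch in core_values:
--                 push([major, minor, patch])
--
--     return output
-- ===== SOURCE B (Python) =====
-- def gen_core_arrangement_with_repetition(
--         core_values: set[int], core_gen_null: bool = True,
--         always_included: set[int] = set()) -> list[list[int]]:
--
--     assert always_included.issubset(core_values)
--     output: list[list[int]] = []
--
--     def gen(prefix: list[int]):
--         # emit this prefix first (pre-order), then extend it
--         if (len(prefix) == 3 or core_gen_null) and always_included.issubset(prefix):
--             output.append(prefix)
--         if len(prefix) < 3:
--             for x in core_values:
--                 gen(prefix + [x])
--
--     for major in core_values: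
--         gen([major])
--
--     return output
-- ===== Notes on version B (the rewrite author's own statement) =====
-- stated objective: simpler
-- what changed: Replaces the three hand-written nested loops (with a separate early-return push helper and per-depth core_gen_null guards) by one recursive gen(prefix) that emits each prefix in pre-order under a single combined condition and recurses up to depth 3.
import Mathlib
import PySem

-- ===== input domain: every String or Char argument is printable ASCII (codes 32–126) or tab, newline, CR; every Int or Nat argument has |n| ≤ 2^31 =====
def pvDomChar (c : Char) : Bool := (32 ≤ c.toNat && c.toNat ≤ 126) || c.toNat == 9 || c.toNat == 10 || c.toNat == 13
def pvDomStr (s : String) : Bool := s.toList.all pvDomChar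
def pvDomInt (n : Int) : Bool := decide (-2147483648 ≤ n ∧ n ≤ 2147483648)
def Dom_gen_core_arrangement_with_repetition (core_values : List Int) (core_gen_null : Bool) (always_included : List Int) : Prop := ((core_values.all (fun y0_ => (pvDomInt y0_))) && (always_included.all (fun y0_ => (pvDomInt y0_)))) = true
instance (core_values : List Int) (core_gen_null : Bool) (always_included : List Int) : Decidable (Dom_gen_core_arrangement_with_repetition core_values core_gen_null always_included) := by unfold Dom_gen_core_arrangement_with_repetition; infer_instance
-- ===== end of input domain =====

-- B replaces A's three nested loops by one pre-order recursion gen(pre_); same output, simpler decomposition.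
-- ===== PORT A =====
-- A's inner push: append core_list iff every obligatory item of always_included is in it
def pushA (always_included : List Int) (output : List (List Int)) (core_list : List Int) : List (List Int) :=
  if always_included.all (fun x => core_list.contains x) then output ++ [core_list] else output

def gen_core_arrangement_with_repetition (core_values : List Int) (core_gen_null : Bool) (always_included : List Int) : List (List Int) :=
  core_values.foldl (fun output major =>
    let o1 := if core_gen_null then pushA always_included output [major] else output
    core_values.foldl (fun output minor =>
      let o2 := if core_gen_null then pushA always_included output [major, minor] else output
      core_values.foldl (fun output patch =>
        pushA always_included output [major, minor, patch]) o2) o1) []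

-- ===== PORT B =====
-- B's emit condition: (len(pre_) == 3 or core_gen_null) and always_included.issubset(pre_);
-- rem = 3 - len(pre_), so len == 3 ↔ rem == 0
def emitB (always_included : List Int) (core_gen_null : Bool) (rem : Nat) (pre_ : List Int) (out : List (List Int)) : List (List Int) :=
  if ((rem == 0) || core_gen_null) && always_included.all (fun x => pre_.contains x) then out ++ [pre_] else out

-- B's recursive gen(pre_), with the remaining depth rem as the recursion measure
def genB (core_values always_included : List Int) (core_gen_null : Bool) : Nat → List Int → List (List Int) → List (List Int)
  | rem, pre_, out =>
    let out1 := emitB always_included core_gen_null rem pre_ out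
    match rem with
    | 0 => out1
    | r + 1 => core_values.foldl (fun o x => genB core_values always_included core_gen_null r (pre_ ++ [x]) o) out1

def gen_core_arrangement_with_repetition_alt (core_values : List Int) (core_gen_null : Bool) (always_included : List Int) : List (List Int) :=
  core_values.foldl (fun out major => genB core_values always_included core_gen_null 2 [major] out) []

-- ===== PRECONDITION & SPEC =====
-- Pre_ excludes exactly the inputs on which A's assert fails (AssertionError): always_included must be a subset of core_values.
def Pre_gen_core_arrangement_with_repetition (core_values : List Int) (core_gen_null : Bool) (always_included : List Int) : Prop :=
  ∀ x ∈ always_included, x ∈ core_values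
instance (core_values : List Int) (core_gen_null : Bool) (always_included : List Int) : Decidable (Pre_gen_core_arrangement_with_repetition core_values core_gen_null always_included) := by unfold Pre_gen_core_arrangement_with_repetition; infer_instance

def pvWitness_gen_core_arrangement_with_repetition : List Int × Bool × List Int := ([0, 1], true, [0])

def Spec_gen_core_arrangement_with_repetition (core_values : List Int) (core_gen_null : Bool) (always_included : List Int) (out : List (List Int)) : Prop := out = gen_core_arrangement_with_repetition_alt core_values core_gen_null always_included
instance (core_values : List Int) (core_gen_null : Bool) (always_included : List Int) (out : List (List Int)) : Decidable (Spec_gen_core_arrangement_with_repetition core_values core_gen_null always_included out) := by unfold Spec_gen_core_arrangement_with_repetition; infer_instance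

-- ===== CLAIM (what is proved, stated in full; the proofs are below) =====
def Claim_equal_gen_core_arrangement_with_repetition : Prop := ∀ (core_values : List Int) (core_gen_null : Bool) (always_included : List Int), Dom_gen_core_arrangement_with_repetition core_values core_gen_null always_included → Pre_gen_core_arrangement_with_repetition core_values core_gen_null always_included → Spec_gen_core_arrangement_with_repetition core_values core_gen_null always_included (gen_core_arrangement_with_repetition core_values core_gen_null always_included)

-- ===== LEMMAS AND PROOFS =====
theorem emitB_zero (ai : List Int) (cgn : Bool) (p : List Int) (o : List (List Int)) :
    emitB ai cgn 0 p o = pushA ai o p := by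
  simp [emitB, pushA]

theorem emitB_succ (ai : List Int) (cgn : Bool) (r : Nat) (p : List Int) (o : List (List Int)) :
    emitB ai cgn (r + 1) p o = if cgn then pushA ai o p else o := by
  cases cgn <;> simp [emitB, pushA]

theorem genB_zero (cv ai : List Int) (cgn : Bool) (p : List Int) (o : List (List Int)) :
    genB cv ai cgn 0 p o = pushA ai o p := by
  simp [genB, emitB_zero]

theorem genB_succ (cv ai : List Int) (cgn : Bool) (r : Nat) (p : List Int) (o : List (List Int)) :
    genB cv ai cgn (r + 1) p o =
      cv.foldl (fun o x => genB cv ai cgn r (p ++ [x]) o)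
        (if cgn then pushA ai o p else o) := by
  conv_lhs => rw [genB]
  simp [emitB_succ]

theorem genB_two (cv ai : List Int) (cgn : Bool) (m : Int) (o : List (List Int)) :
    genB cv ai cgn 2 [m] o =
      cv.foldl (fun output minor =>
        let o2 := if cgn then pushA ai output [m, minor] else output
        cv.foldl (fun output patch => pushA ai output [m, minor, patch]) o2)
        (if cgn then pushA ai o [m] else o) := by
  rw [genB_succ]
  apply List.foldl_ext
  intro b x _
  rw [genB_succ]
  apply List.foldl_ext
  intro b' y _
  rw [genB_zero]
  simp

-- ===== VERDICT (by name: the statement is the Claim_ definition above) =====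
theorem gen_core_arrangement_with_repetition_spec : Claim_equal_gen_core_arrangement_with_repetition := by
  intro cv cgn ai _ _
  unfold Spec_gen_core_arrangement_with_repetition
  unfold gen_core_arrangement_with_repetition gen_core_arrangement_with_repetition_alt
  apply Eq.symm
  apply List.foldl_ext
  intro o m _
  rw [genB_two]
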